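-- pv_equiv track=rewrite | github.com/giovannicelotto/BTV | scripts/tuplizer/ntupleLinker.py | getOneDaughter
-- ===== SOURCE A (Python) =====
-- def getOneDaughter(mesons, GenPart_genPartIdxMother_, nGenPart_):
--     oneDaughter = []      # one index of a daughter of the meson aligned
--     for mes in mesons:
--         foundDaughter = -1
--         for gp in range(nGenPart_):
--             if (GenPart_genPartIdxMother_[gp] == mes):
--                 oneDaughter.append(gp)
--                 foundDaughter=gp
--                 # fill one daughter per meson
--                 break
--         if foundDaughter==-1:
--             oneDaughter.append(-1)
--     assert len(mesons)==len(oneDaughter)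
--     return oneDaughter
-- ===== SOURCE B (Python) =====
-- def getOneDaughter(mesons, GenPart_genPartIdxMother_, nGenPart_):
--     # One pass over the GenPart indices builds mother -> first daughter index,
--     # then each meson is a single dictionary lookup.
--     first = {}
--     for gp in range(nGenPart_):
--         m = GenPart_genPartIdxMother_[gp]
--         if m not in first:
--             first[m] = gp
--     return [first.get(mes, -1) for mes in mesons]
-- ===== Notes on version B (the rewrite author's own statement) =====
-- stated objective: faster
-- what changed: Replaced the per-meson rescan of all nGenPart_ mother indices by one precomputed dict mother->first daughter index followed by O(1) lookups per meson.
-- outside the precondition, e.g. on getOneDaughter([5], [5], 3): A returns [0], B raises IndexError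
import Mathlib
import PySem

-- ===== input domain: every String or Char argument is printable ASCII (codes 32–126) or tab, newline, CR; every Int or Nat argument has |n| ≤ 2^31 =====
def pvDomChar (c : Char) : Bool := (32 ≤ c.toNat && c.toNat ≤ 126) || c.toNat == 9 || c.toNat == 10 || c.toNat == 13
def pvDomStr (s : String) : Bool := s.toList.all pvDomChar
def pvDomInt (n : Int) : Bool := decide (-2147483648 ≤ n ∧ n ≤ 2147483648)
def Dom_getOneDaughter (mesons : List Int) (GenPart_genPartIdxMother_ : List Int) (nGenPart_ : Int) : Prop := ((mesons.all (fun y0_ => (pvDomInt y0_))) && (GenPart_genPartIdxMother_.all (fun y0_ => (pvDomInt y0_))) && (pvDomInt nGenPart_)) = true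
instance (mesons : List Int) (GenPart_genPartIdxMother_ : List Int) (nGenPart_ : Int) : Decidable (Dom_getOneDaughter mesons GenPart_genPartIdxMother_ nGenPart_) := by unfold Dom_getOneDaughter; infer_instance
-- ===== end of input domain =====

-- B replaces A's per-meson rescan of all nGenPart_ mother indices by one precomputed
-- dict mother -> first daughter index, then one lookup per meson (objective: faster).

-- ===== PORT A =====
-- inner 'for gp in range(nGenPart_): if GenPart[gp] == mes: break' scan;
-- 'none' at the match's 'none' arm marks where Python raises IndexError (excluded by Pre_).
def findDaughterA (gpm : List Int) (mes : Int) : List Int → Option Int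
  | [] => none
  | gp :: rest =>
    match PySem.List.pyGet? gpm gp with
    | none => none
    | some v => if v = mes then some gp else findDaughterA gpm mes rest

def getOneDaughter (mesons : List Int) (GenPart_genPartIdxMother_ : List Int) (nGenPart_ : Int) : List Int :=
  mesons.foldl (fun oneDaughter mes =>
    match findDaughterA GenPart_genPartIdxMother_ mes (PySem.List.pyRange 0 nGenPart_ 1) with
    | some gp => oneDaughter ++ [gp]
    | none => oneDaughter ++ [-1]) []

-- ===== PORT B =====
-- one step of B's dict-building loop; 'none' arm = Python IndexError (excluded by Pre_).
def firstStepB (gpm : List Int) (d : PySem.Dict Int Int) (gp : Int) : PySem.Dict Int Int :=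
  match PySem.List.pyGet? gpm gp with
  | none => d
  | some m => if d.contains m then d else d.insert m gp

def getOneDaughter_alt (mesons : List Int) (GenPart_genPartIdxMother_ : List Int) (nGenPart_ : Int) : List Int :=
  let first := (PySem.List.pyRange 0 nGenPart_ 1).foldl (firstStepB GenPart_genPartIdxMother_) PySem.Dict.empty
  mesons.map (fun mes => first.getD mes (-1))

-- ===== PRECONDITION & SPEC =====
-- Pre_ excludes nGenPart_ > len(GenPart_genPartIdxMother_): there the scan over
-- range(nGenPart_) indexes past the end, so A raises IndexError unless every meson
-- happens to match before the overrun (and B, which always scans all indices, raises).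
def Pre_getOneDaughter (mesons : List Int) (GenPart_genPartIdxMother_ : List Int) (nGenPart_ : Int) : Prop :=
  nGenPart_ ≤ (GenPart_genPartIdxMother_.length : Int)
instance (mesons : List Int) (GenPart_genPartIdxMother_ : List Int) (nGenPart_ : Int) : Decidable (Pre_getOneDaughter mesons GenPart_genPartIdxMother_ nGenPart_) := by unfold Pre_getOneDaughter; infer_instance

def pvWitness_getOneDaughter : List Int × List Int × Int := ([1, -1, 7], [0, 1, 1, 2], 4)

def Spec_getOneDaughter (mesons : List Int) (GenPart_genPartIdxMother_ : List Int) (nGenPart_ : Int) (out : List Int) : Prop := out = getOneDaughter_alt mesons GenPart_genPartIdxMother_ nGenPart_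
instance (mesons : List Int) (GenPart_genPartIdxMother_ : List Int) (nGenPart_ : Int) (out : List Int) : Decidable (Spec_getOneDaughter mesons GenPart_genPartIdxMother_ nGenPart_ out) := by unfold Spec_getOneDaughter; infer_instance

-- ===== CLAIM (what is proved, stated in full; the proofs are below) =====
def Claim_equal_getOneDaughter : Prop := ∀ (mesons : List Int) (GenPart_genPartIdxMother_ : List Int) (nGenPart_ : Int), Dom_getOneDaughter mesons GenPart_genPartIdxMother_ nGenPart_ → Pre_getOneDaughter mesons GenPart_genPartIdxMother_ nGenPart_ → Spec_getOneDaughter mesons GenPart_genPartIdxMother_ nGenPart_ (getOneDaughter mesons GenPart_genPartIdxMother_ nGenPart_)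

-- ===== LEMMAS AND PROOFS =====

-- B's dict-fold, read back at one key, is A's first-match scan over the same index list.
lemma foldl_firstStepB_getD (gpm : List Int) (mes : Int) :
    ∀ (L : List Int) (d : PySem.Dict Int Int),
      (∀ gp ∈ L, (PySem.List.pyGet? gpm gp).isSome) →
      (L.foldl (firstStepB gpm) d).getD mes (-1)
        = (d.get? mes).getD ((findDaughterA gpm mes L).getD (-1)) := by
  intro L
  induction L with
  | nil =>
    intro d _
    simp [findDaughterA, PySem.Dict.getD_eq_get?_getD]
  | cons gp rest ih =>
    intro d h
    obtain ⟨v, hv⟩ := Option.isSome_iff_exists.mp (h gp (List.mem_cons_self))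
    have hrest : ∀ g ∈ rest, (PySem.List.pyGet? gpm g).isSome :=
      fun g hg => h g (List.mem_cons_of_mem _ hg)
    simp only [List.foldl_cons, findDaughterA, firstStepB, hv]
    by_cases hvm : v = mes
    · subst hvm
      by_cases hc : d.contains v
      · simp only [hc, if_true, ih d hrest]
        have hs : (d.get? v).isSome := (PySem.Dict.contains_eq_isSome_get? d v) ▸ hc
        obtain ⟨j, hj⟩ := Option.isSome_iff_exists.mp hs
        simp [hj]
      · simp only [hc, Bool.false_eq_true, if_false, if_true, ih _ hrest]
        have hnone : d.get? v = none := by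
          rw [PySem.Dict.get?_eq_none_iff_contains]
          simpa using hc
        simp [hnone, PySem.Dict.get?_insert_self]
    · have step : (if d.contains v then d else d.insert v gp).get? mes = d.get? mes := by
        by_cases hc : d.contains v
        · simp [hc]
        · simp only [hc, Bool.false_eq_true, if_false]
          exact PySem.Dict.get?_insert_of_ne d gp (Ne.symm hvm)
      simp only [hvm, if_false, ih _ hrest, step]

-- A's foldl with ++ [·] is a map.
lemma getOneDaughter_eq_map (mesons gpm : List Int) (n : Int) :
    getOneDaughter mesons gpm n
      = mesons.map (fun mes => (findDaughterA gpm mes (PySem.List.pyRange 0 n 1)).getD (-1)) := by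
  unfold getOneDaughter
  have hf : (fun (acc : List Int) mes =>
      match findDaughterA gpm mes (PySem.List.pyRange 0 n 1) with
      | some gp => acc ++ [gp]
      | none => acc ++ [-1])
    = fun (acc : List Int) mes =>
        acc ++ [(findDaughterA gpm mes (PySem.List.pyRange 0 n 1)).getD (-1)] := by
    funext acc mes
    cases h : findDaughterA gpm mes (PySem.List.pyRange 0 n 1) <;> simp
  rw [hf, PySem.List.foldl_append_singleton_eq_map]
  simp

-- ===== VERDICT (by name: the statement is the Claim_ definition above) =====
theorem getOneDaughter_spec : Claim_equal_getOneDaughter := by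
  intro mesons gpm n _ hpre
  unfold Spec_getOneDaughter getOneDaughter_alt
  rw [getOneDaughter_eq_map]
  apply List.map_congr_left
  intro mes _
  have hsome : ∀ gp ∈ PySem.List.pyRange 0 n 1, (PySem.List.pyGet? gpm gp).isSome := by
    intro gp hgp
    have hb := (PySem.List.mem_pyRange_one).mp hgp
    rw [PySem.List.pyGet?_of_nonneg gpm hb.1]
    have : gp.toNat < gpm.length := by
      have := hpre
      unfold Pre_getOneDaughter at this
      omega
    simp [List.getElem?_eq_getElem this]
  rw [foldl_firstStepB_getD gpm mes _ _ hsome]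
  simp [PySem.Dict.get?_empty]
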